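-- pv_equiv track=rewrite | github.com/Fintal78/LLMAX | src/battery_score_single_test.py | get_best_match
-- ===== SOURCE A (Python) =====
-- def get_best_match(value, score_dict, default=5):
--     # Handle wrapped value: if value is a dict, try to extract 'value' or string representation
--     if isinstance(value, dict):
--         value = value.get("value", value)
--
--     if not value or isinstance(value, dict): return default # If still a dict (empty wrapper?), return default
--
--     # Direct match
--     if value in score_dict: return score_dict[value]
--     # Partial match (longest match wins)
--     matches = [k for k in score_dict.keys() if k.lower() in str(value).lower()]
--     if matches:
--         best_match = max(matches, key=len)
--         return score_dict[best_match]
--     return default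
-- ===== SOURCE B (Python) =====
-- def get_best_match(value, score_dict, default=5):
--     # Handle wrapped value: if value is a dict, try to extract 'value' or string representation
--     if isinstance(value, dict):
--         value = value.get("value", value)
--     if not value or isinstance(value, dict):
--         return default
--     # Single pass over the items: an exact key match returns its score immediately;
--     # otherwise keep the score of the first longest substring-matching key.
--     text = str(value).lower()
--     best = None  # (key length, score) of the best partial match so far
--     for k, v in score_dict.items():
--         if k == value:
--             return v
--         if (best is None or len(k) > best[0]) and k.lower() in text:
--             best = (len(k), v)
--     return default if best is None else best[1]
-- ===== Notes on version B (the rewrite author's own statement) =====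
-- stated objective: alternative
-- what changed: B replaces A's two-phase partial match (build the list of all substring-matching keys, then max(key=len), then a second dict lookup) by a single pass over the dict items that returns immediately on an exact key hit and otherwise keeps a (length, score) accumulator for the first longest substring-matching key, lowering the value once instead of per key.
import Mathlib
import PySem

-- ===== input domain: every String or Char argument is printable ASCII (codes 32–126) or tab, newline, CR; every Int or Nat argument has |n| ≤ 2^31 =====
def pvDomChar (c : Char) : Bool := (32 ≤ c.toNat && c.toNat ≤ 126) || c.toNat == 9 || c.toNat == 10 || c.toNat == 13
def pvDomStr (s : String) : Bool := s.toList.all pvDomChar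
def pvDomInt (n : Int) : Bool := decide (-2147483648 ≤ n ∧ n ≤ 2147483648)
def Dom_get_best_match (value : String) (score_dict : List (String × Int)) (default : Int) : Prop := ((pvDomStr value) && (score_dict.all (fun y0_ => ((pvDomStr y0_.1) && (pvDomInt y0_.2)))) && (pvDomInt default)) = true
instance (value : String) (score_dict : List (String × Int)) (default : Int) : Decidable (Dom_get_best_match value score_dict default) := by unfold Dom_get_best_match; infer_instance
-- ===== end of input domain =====

-- B replaces A's collect-all-matches + max(key=len) two-phase scan by a single pass over the
-- dict items that returns on an exact key hit and otherwise keeps the first longest partial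
-- match, lowering the value once (objective: alternative).


-- ===== PORT A =====
-- value is a String here, so the isinstance(value, dict) branches never fire;
-- 'not value' on a str is 'value == ""'. 'if matches: best = max(matches, key=len)' is the
-- match on PySem.List.max? (some ↔ matches nonempty, first longest element).
def get_best_match (value : String) (score_dict : List (String × Int)) (default : Int) : Int :=
  if value = "" then default
  else
    match (PySem.Dict.ofList score_dict).get? value with
    | some v => v
    | none =>
      match PySem.List.max?
          ((PySem.Dict.ofList score_dict).keys.filter
            (fun k => PySem.Str.isIn (PySem.Str.lower k) (PySem.Str.lower value)))
          (fun k => PySem.Str.len k) with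
      | some best => ((PySem.Dict.ofList score_dict).get? best).getD default
      | none => default

-- ===== PORT B =====
-- the 'for k, v in score_dict.items()' loop of Source B, with its early return on an exact key
-- match and the 'best = (len(k), v)' accumulator
def gbmLoop (value : String) (text : String) (default : Int) :
    List (String × Int) → Option (Int × Int) → Int
  | [], best =>
    match best with
    | none => default
    | some b => b.2
  | (k, v) :: rest, best =>
    if k = value then v
    else if (match best with | none => true | some b => decide (b.1 < PySem.Str.len k))
            && PySem.Str.isIn (PySem.Str.lower k) text then
      gbmLoop value text default rest (some (PySem.Str.len k, v))
    else
      gbmLoop value text default rest best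

def get_best_match_alt (value : String) (score_dict : List (String × Int)) (default : Int) : Int :=
  if value = "" then default
  else
    gbmLoop value (PySem.Str.lower value) default (PySem.Dict.ofList score_dict).items none

-- ===== PRECONDITION & SPEC =====
def Spec_get_best_match (value : String) (score_dict : List (String × Int)) (default : Int) (out : Int) : Prop := out = get_best_match_alt value score_dict default
instance (value : String) (score_dict : List (String × Int)) (default : Int) (out : Int) : Decidable (Spec_get_best_match value score_dict default out) := by unfold Spec_get_best_match; infer_instance

-- ===== CLAIM (what is proved, stated in full; the proofs are below) =====
def Claim_equal_get_best_match : Prop := ∀ (value : String) (score_dict : List (String × Int)) (default : Int), Dom_get_best_match value score_dict default → Spec_get_best_match value score_dict default (get_best_match value score_dict default)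


-- ===== LEMMAS AND PROOFS =====

-- The step B's loop applies to its accumulator once the exact-match test has failed.
def gbmStep (text : String) (acc : Option (Int × Int)) (kv : String × Int) : Option (Int × Int) :=
  if (match acc with | none => true | some b => decide (b.1 < PySem.Str.len kv.1))
      && PySem.Str.isIn (PySem.Str.lower kv.1) text then some (PySem.Str.len kv.1, kv.2)
  else acc

-- The step of A's max?-fold (first extremal element, key = length of the key), on pairs.
def maxStep (acc : Option (String × Int)) (kv : String × Int) : Option (String × Int) :=
  match acc with
  | none => some kv
  | some m => if PySem.Str.len m.1 < PySem.Str.len kv.1 then some kv else some m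

-- The same step on the keys alone (literally the fold inside PySem.List.max?).
def stepK (acc : Option String) (k : String) : Option String :=
  match acc with
  | none => some k
  | some m => if PySem.Str.len m < PySem.Str.len k then some k else some m

-- If value is a key of the item list, B's loop returns its paired score (any accumulator).
lemma gbmLoop_of_get?_eq_some (value text : String) (default v : Int)
    (l : List (String × Int)) (best : Option (Int × Int))
    (h : (PySem.Dict.mk l).get? value = some v) :
    gbmLoop value text default l best = v := by
  induction l generalizing best with
  | nil => simp [PySem.Dict.get?] at h
  | cons kv rest ih =>
    obtain ⟨k, w⟩ := kv
    rw [PySem.Dict.get?_mk_cons] at h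
    by_cases hk : k = value
    · subst hk
      simp only [beq_self_eq_true, if_pos, Option.some.injEq] at h
      simp [gbmLoop, h]
    · have hne : (k == value) = false := by simp [hk]
      rw [hne] at h
      simp only [Bool.false_eq_true, if_false] at h
      simp only [gbmLoop, if_neg hk]
      by_cases hc : ((match best with
          | none => true
          | some b => decide (b.1 < PySem.Str.len k)) &&
            PySem.Str.isIn (PySem.Str.lower k) text) = true
      · rw [if_pos hc]; exact ih _ h
      · rw [if_neg hc]; exact ih _ h

-- If value is not a key, B's loop is the gbmStep fold followed by the final match.
lemma gbmLoop_of_not_mem (value text : String) (default : Int)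
    (l : List (String × Int)) (best : Option (Int × Int))
    (h : ∀ kv ∈ l, kv.1 ≠ value) :
    gbmLoop value text default l best =
      match l.foldl (gbmStep text) best with
      | none => default
      | some b => b.2 := by
  induction l generalizing best with
  | nil => rfl
  | cons kv rest ih =>
    obtain ⟨k, w⟩ := kv
    have hk : k ≠ value := h (k, w) (by simp)
    have hrest : ∀ kv ∈ rest, kv.1 ≠ value := fun kv hm => h kv (by simp [hm])
    simp only [gbmLoop, if_neg hk, List.foldl_cons]
    by_cases hc : ((match best with
        | none => true
        | some b => decide (b.1 < PySem.Str.len k)) &&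
          PySem.Str.isIn (PySem.Str.lower k) text) = true
    · rw [if_pos hc, ih _ hrest]
      have : gbmStep text best (k, w) = some (PySem.Str.len k, w) := by
        simp only [gbmStep]; rw [if_pos hc]
      rw [this]
    · rw [if_neg hc, ih _ hrest]
      have : gbmStep text best (k, w) = best := by
        simp only [gbmStep]; rw [if_neg hc]
      rw [this]

-- The gbmStep fold over l is the gbmStep fold over the substring-filtered sublist.
lemma gbmStep_foldl_filter (text : String) (l : List (String × Int)) (best : Option (Int × Int)) :
    l.foldl (gbmStep text) best =
      (l.filter (fun kv => PySem.Str.isIn (PySem.Str.lower kv.1) text)).foldl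
        (gbmStep text) best := by
  induction l generalizing best with
  | nil => rfl
  | cons kv rest ih =>
    by_cases hp : PySem.Str.isIn (PySem.Str.lower kv.1) text = true
    · simp only [List.filter_cons, hp, if_pos, List.foldl_cons]
      exact ih _
    · have hstep : gbmStep text best kv = best := by
        simp only [gbmStep, Bool.eq_false_iff.mpr hp, Bool.and_false, Bool.false_eq_true,
          if_false]
      simp only [List.filter_cons, hp, Bool.false_eq_true, if_false, List.foldl_cons, hstep]
      exact ih _

-- One step of B's accumulator update simulates one step of the max?-fold.
lemma gbmStep_comm (text : String) (kv : String × Int)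
    (hp : PySem.Str.isIn (PySem.Str.lower kv.1) text = true)
    (acc : Option (String × Int)) :
    gbmStep text (acc.map (fun kv => (PySem.Str.len kv.1, kv.2))) kv
      = (maxStep acc kv).map (fun kv => (PySem.Str.len kv.1, kv.2)) := by
  cases acc with
  | none =>
    show (if (true && PySem.Str.isIn (PySem.Str.lower kv.1) text) = true
        then some (PySem.Str.len kv.1, kv.2) else none) = some (PySem.Str.len kv.1, kv.2)
    rw [Bool.true_and, hp]
    rfl
  | some m =>
    show (if (decide (PySem.Str.len m.1 < PySem.Str.len kv.1) &&
            PySem.Str.isIn (PySem.Str.lower kv.1) text) = true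
        then some (PySem.Str.len kv.1, kv.2) else some (PySem.Str.len m.1, m.2))
      = (if PySem.Str.len m.1 < PySem.Str.len kv.1 then some kv else some m).map
          (fun kv => (PySem.Str.len kv.1, kv.2))
    rw [hp, Bool.and_true]
    by_cases hlt : PySem.Str.len m.1 < PySem.Str.len kv.1
    · rw [decide_eq_true hlt, if_pos hlt]; rfl
    · rw [decide_eq_false hlt, if_neg hlt]; rfl

-- On a list all of whose members pass the substring test, B's fold simulates the
-- max?-fold, carrying (len key, score) in place of the (key, score) pair.
lemma gbm_foldl_eq (text : String) (l : List (String × Int)) :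
    (∀ kv ∈ l, PySem.Str.isIn (PySem.Str.lower kv.1) text = true) →
    ∀ acc : Option (String × Int),
      l.foldl (gbmStep text) (acc.map (fun kv => (PySem.Str.len kv.1, kv.2)))
        = (l.foldl maxStep acc).map (fun kv => (PySem.Str.len kv.1, kv.2)) := by
  induction l with
  | nil => intro _ acc; rfl
  | cons kv rest ih =>
    intro hl acc
    simp only [List.foldl_cons]
    rw [gbmStep_comm text kv (hl kv (by simp)) acc]
    exact ih (fun kv hm => hl kv (by simp [hm])) (maxStep acc kv)

-- One step of the key-only max?-fold is the fst-projection of the pair max?-fold step.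
lemma stepK_comm (acc : Option (String × Int)) (kv : String × Int) :
    stepK (acc.map Prod.fst) kv.1 = (maxStep acc kv).map Prod.fst := by
  cases acc with
  | none => rfl
  | some m =>
    show (if PySem.Str.len m.1 < PySem.Str.len kv.1 then some kv.1 else some m.1)
      = (if PySem.Str.len m.1 < PySem.Str.len kv.1 then some kv else some m).map Prod.fst
    by_cases hlt : PySem.Str.len m.1 < PySem.Str.len kv.1
    · rw [if_pos hlt, if_pos hlt]; rfl
    · rw [if_neg hlt, if_neg hlt]; rfl

-- The key-only max?-fold over the projected keys is the fst-projection of the pair fold.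
lemma stepK_foldl_map_fst (l : List (String × Int)) :
    ∀ acc : Option (String × Int),
      (l.map Prod.fst).foldl stepK (acc.map Prod.fst)
        = (l.foldl maxStep acc).map Prod.fst := by
  induction l with
  | nil => intro acc; rfl
  | cons kv rest ih =>
    intro acc
    simp only [List.map_cons, List.foldl_cons]
    rw [stepK_comm]
    exact ih (maxStep acc kv)

-- Two folds with pointwise-equal step functions agree.
lemma foldl_fun_ext {β α : Type} (f g : β → α → β) (h : ∀ a x, f a x = g a x) :
    ∀ (l : List α) (init : β), l.foldl f init = l.foldl g init := by
  intro l
  induction l with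
  | nil => intro init; rfl
  | cons x t ih => intro init; rw [List.foldl_cons, List.foldl_cons, h]; exact ih _

-- A's max? over key length is the stepK fold.
lemma max?_len_eq_foldl_stepK (xs : List String) :
    PySem.List.max? xs (fun k => PySem.Str.len k) = xs.foldl stepK none := by
  unfold PySem.List.max?
  exact foldl_fun_ext _ _ (by intro a x; cases a <;> rfl) xs none

-- The result of the pair max?-fold is the accumulator or a member of the list.
lemma foldl_maxStep_mem (l : List (String × Int)) :
    ∀ (acc : Option (String × Int)) (m : String × Int),
      l.foldl maxStep acc = some m → acc = some m ∨ m ∈ l := by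
  induction l with
  | nil => intro acc m h; exact Or.inl h
  | cons kv rest ih =>
    intro acc m h
    rcases ih (maxStep acc kv) m h with h1 | h2
    · cases acc with
      | none =>
        simp only [maxStep] at h1
        obtain rfl := Option.some.inj h1
        exact Or.inr (by simp)
      | some a =>
        by_cases hlt : PySem.Str.len a.1 < PySem.Str.len kv.1
        · simp only [maxStep, if_pos hlt] at h1
          obtain rfl := Option.some.inj h1
          exact Or.inr (by simp)
        · simp only [maxStep, if_neg hlt] at h1
          exact Or.inl h1
    · exact Or.inr (List.mem_cons_of_mem _ h2)

-- ===== VERDICT (by name: the statement is the Claim_ definition above) =====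
theorem get_best_match_spec : Claim_equal_get_best_match := by
  intro value score_dict default _
  unfold Spec_get_best_match get_best_match get_best_match_alt
  by_cases hv : value = ""
  · simp [hv]
  · simp only [if_neg hv]
    cases hget : (PySem.Dict.ofList score_dict).get? value with
    | some v =>
      exact (gbmLoop_of_get?_eq_some value (PySem.Str.lower value) default v
        (PySem.Dict.ofList score_dict).items none hget).symm
    | none =>
      have hnot : ∀ kv ∈ (PySem.Dict.ofList score_dict).items, kv.1 ≠ value := by
        intro kv hm hkv
        have hg := PySem.Dict.get?_of_mem_items (PySem.Dict.ofList score_dict)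
          (k := kv.1) (v := kv.2) (by simpa using hm)
          (PySem.Dict.nodup_keys_ofList score_dict)
        rw [hkv, hget] at hg
        simp at hg
      rw [gbmLoop_of_not_mem value (PySem.Str.lower value) default _ none hnot,
        gbmStep_foldl_filter]
      have hall : ∀ kv ∈ (PySem.Dict.ofList score_dict).items.filter
            (fun kv => PySem.Str.isIn (PySem.Str.lower kv.1) (PySem.Str.lower value)),
          PySem.Str.isIn (PySem.Str.lower kv.1) (PySem.Str.lower value) = true :=
        fun kv hm => (List.mem_filter.mp hm).2
      have hB : List.foldl (gbmStep (PySem.Str.lower value)) none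
            ((PySem.Dict.ofList score_dict).items.filter
              (fun kv => PySem.Str.isIn (PySem.Str.lower kv.1) (PySem.Str.lower value)))
          = (List.foldl maxStep none
              ((PySem.Dict.ofList score_dict).items.filter
                (fun kv => PySem.Str.isIn (PySem.Str.lower kv.1) (PySem.Str.lower value)))).map
              (fun kv => (PySem.Str.len kv.1, kv.2)) :=
        gbm_foldl_eq (PySem.Str.lower value) _ hall none
      rw [hB]
      have hkeys : (PySem.Dict.ofList score_dict).keys.filter
            (fun k => PySem.Str.isIn (PySem.Str.lower k) (PySem.Str.lower value))
          = ((PySem.Dict.ofList score_dict).items.filter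
              (fun kv => PySem.Str.isIn (PySem.Str.lower kv.1) (PySem.Str.lower value))).map
              Prod.fst := by
        simp only [PySem.Dict.keys]
        rw [List.filter_map]
        rfl
      have hA : List.foldl stepK none
            (((PySem.Dict.ofList score_dict).items.filter
              (fun kv => PySem.Str.isIn (PySem.Str.lower kv.1) (PySem.Str.lower value))).map
              Prod.fst)
          = (List.foldl maxStep none
              ((PySem.Dict.ofList score_dict).items.filter
                (fun kv => PySem.Str.isIn (PySem.Str.lower kv.1) (PySem.Str.lower value)))).map
              Prod.fst :=
        stepK_foldl_map_fst _ none
      rw [hkeys, max?_len_eq_foldl_stepK, hA]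
      cases hres : List.foldl maxStep none
          ((PySem.Dict.ofList score_dict).items.filter
            (fun kv => PySem.Str.isIn (PySem.Str.lower kv.1) (PySem.Str.lower value))) with
      | none => rfl
      | some bkv =>
        have hmem : bkv ∈ (PySem.Dict.ofList score_dict).items := by
          rcases foldl_maxStep_mem _ none bkv hres with h1 | h2
          · simp at h1
          · exact List.mem_of_mem_filter h2
        have hgb : (PySem.Dict.ofList score_dict).get? bkv.1 = some bkv.2 :=
          PySem.Dict.get?_of_mem_items (PySem.Dict.ofList score_dict)
            (by simpa using hmem) (PySem.Dict.nodup_keys_ofList score_dict)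
        simp only [Option.map_some, hgb, Option.getD_some]
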